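-- pv_equiv track=rewrite | github.com/MaticTonin/Faks-FMF | 2 LETNIK/Programiranje/Nizi/disemvoweling.py | razveljavi_disemvowel
-- ===== SOURCE A (Python) =====
-- def razveljavi_disemvowel(niz):
--     st_zvezdic=niz.count("*")
--     if st_zvezdic==0:
--         return niz
--     samoglasniki_v_nizu=niz[-st_zvezdic:]
--     nov_niz=""
--     stevec=0
--     for i in niz[:-st_zvezdic]:
--         if i == "*":
--             nov_niz += samoglasniki_v_nizu[stevec]
--             stevec+=1
--         else:
--             nov_niz += i
--     return nov_niz
-- ===== SOURCE B (Python) =====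
-- def razveljavi_disemvowel(niz):
--     n = niz.count("*")
--     if n == 0:
--         return niz
--     vowels = niz[-n:]
--     segments = niz[:-n].split("*")
--     parts = [segments[0]]
--     for seg, v in zip(segments[1:], vowels):
--         parts.append(v)
--         parts.append(seg)
--     return "".join(parts)
-- ===== Notes on version B (the rewrite author's own statement) =====
-- stated objective: alternative
-- what changed: Replaces the character-by-character scan with an index counter by splitting the body on the asterisk separator and interleaving the stored vowels between the segments via zip and join.
import Mathlib
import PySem

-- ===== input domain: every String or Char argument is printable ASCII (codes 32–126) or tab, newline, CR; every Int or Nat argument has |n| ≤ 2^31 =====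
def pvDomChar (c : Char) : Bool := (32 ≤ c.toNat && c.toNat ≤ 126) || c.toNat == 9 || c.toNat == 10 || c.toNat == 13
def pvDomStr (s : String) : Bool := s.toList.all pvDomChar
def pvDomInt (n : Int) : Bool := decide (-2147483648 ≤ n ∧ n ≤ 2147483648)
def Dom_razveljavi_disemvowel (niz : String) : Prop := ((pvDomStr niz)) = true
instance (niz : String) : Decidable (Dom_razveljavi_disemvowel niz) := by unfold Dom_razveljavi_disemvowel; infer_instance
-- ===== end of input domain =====

-- B rebuilds the string by splitting the body on '*' and interleaving the stored
-- vowels between the segments (zip + join) instead of A's char-by-char scan with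
-- an index counter; an alternative decomposition of the same cost.


-- ===== PORT A =====
-- literal transliteration of A: count '*', slice off the vowel suffix, then a
-- left fold over the body carrying (nov_niz, stevec); samoglasniki[stevec] is
-- ported with pyGet? (its index is always in range — proved in foldA_eq_scan below,
-- so the .getD ' ' default is never taken).
def razveljavi_disemvowel (niz : String) : String :=
  let st_zvezdic : Nat := PySem.Str.count niz "*"
  if st_zvezdic = 0 then niz
  else
    let samoglasniki_v_nizu : List Char :=
      PySem.Chars.slice niz.toList (some (-(st_zvezdic : Int))) none
    let st :=
      (PySem.Chars.slice niz.toList none (some (-(st_zvezdic : Int)))).foldl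
        (fun (st : List Char × Int) i =>
          if i = '*' then
            (st.1 ++ [(PySem.List.pyGet? samoglasniki_v_nizu st.2).getD ' '], st.2 + 1)
          else
            (st.1 ++ [i], st.2))
        ([], 0)
    String.ofList st.1

-- ===== PORT B =====
-- literal transliteration of Source B: n, vowels = niz[-n:], segments = niz[:-n].split('*'),
-- parts accumulated by the zip loop, ''.join(parts).
def razveljavi_disemvowel_alt (niz : String) : String :=
  let n : Nat := PySem.Str.count niz "*"
  if n = 0 then niz
  else
    let vowels : List Char := PySem.Chars.slice niz.toList (some (-(n : Int))) none
    let segments : List (List Char) :=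
      PySem.Chars.splitOn (PySem.Chars.slice niz.toList none (some (-(n : Int)))) ['*']
    let parts : List (List Char) :=
      (List.zip segments.tail vowels).foldl
        (fun acc p => acc ++ [[p.2], p.1]) [segments.headD []]
    String.ofList (PySem.Chars.join [] parts)

-- ===== PRECONDITION & SPEC =====
def Spec_razveljavi_disemvowel (niz : String) (out : String) : Prop := out = razveljavi_disemvowel_alt niz
instance (niz : String) (out : String) : Decidable (Spec_razveljavi_disemvowel niz out) := by unfold Spec_razveljavi_disemvowel; infer_instance

-- ===== CLAIM (what is proved, stated in full; the proofs are below) =====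
def Claim_equal_razveljavi_disemvowel : Prop := ∀ (niz : String), Dom_razveljavi_disemvowel niz → Spec_razveljavi_disemvowel niz (razveljavi_disemvowel niz)

-- ===== LEMMAS AND PROOFS =====

-- `mySplit c l` is `l.split(c)` as a structural recursion.
def mySplit (c : Char) : List Char → List (List Char)
  | [] => [[]]
  | x :: xs => if x = c then [] :: mySplit c xs else (mySplit c xs).modifyHead (x :: ·)

-- `scan body vs` is the common value: body with each '*' replaced by the next vowel.
def scan : List Char → List Char → List Char
  | [], _ => []
  | x :: xs, vs => if x = '*' then vs.headD ' ' :: scan xs vs.tail else x :: scan xs vs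

theorem mySplit_ne_nil (c : Char) (l : List Char) : mySplit c l ≠ [] := by
  cases l with
  | nil => simp [mySplit]
  | cons x xs =>
    simp only [mySplit]
    split
    · simp
    · cases h : mySplit c xs with
      | nil => exact absurd h (mySplit_ne_nil c xs)
      | cons a t => simp

theorem count_go_singleton (c : Char) :
    ∀ (l : List Char) (fuel acc : Nat), l.length ≤ fuel →
      PySem.Chars.count.go [c] fuel l acc = acc + l.count c := by
  intro l
  induction l with
  | nil =>
    intro fuel acc _
    cases fuel <;> simp [PySem.Chars.count.go]
  | cons x xs ih =>
    intro fuel acc hf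
    cases fuel with
    | zero => simp at hf
    | succ m =>
      simp only [PySem.Chars.count.go, List.isPrefixOf, Bool.and_true,
        List.length_cons, List.length_nil, List.drop_succ_cons, List.drop_zero]
      by_cases hx : c = x
      · subst hx
        simp only [BEq.rfl, if_pos]
        rw [ih m (acc + 1) (by simpa using Nat.le_of_succ_le_succ hf)]
        simp [List.count_cons]
        omega
      · have : (c == x) = false := by simp [hx]
        simp only [this, Bool.false_eq_true, if_neg, not_false_iff]
        rw [ih m acc (by simpa using Nat.le_of_succ_le_succ hf)]
        have : (x == c) = false := by simp [Ne.symm hx]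
        simp [List.count_cons, this]

theorem chars_count_singleton (c : Char) (l : List Char) :
    PySem.Chars.count l [c] = l.count c := by
  have : ([c] : List Char).isEmpty = false := by simp
  simp only [PySem.Chars.count, this, Bool.false_eq_true, if_neg, not_false_iff]
  rw [count_go_singleton c l l.length 0 (le_refl _)]
  omega

theorem splitOn_go_singleton (c : Char) :
    ∀ (l : List Char) (fuel : Nat) (cur : List Char) (acc : List (List Char)),
      l.length ≤ fuel →
      PySem.Chars.splitOn.go [c] fuel l cur acc
        = acc.reverse ++ (mySplit c l).modifyHead (cur.reverse ++ ·) := by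
  intro l
  induction l with
  | nil =>
    intro fuel cur acc _
    cases fuel <;> simp [PySem.Chars.splitOn.go, mySplit]
  | cons x xs ih =>
    intro fuel cur acc hf
    cases fuel with
    | zero => simp at hf
    | succ m =>
      simp only [PySem.Chars.splitOn.go, List.isPrefixOf, Bool.and_true,
        List.length_cons, List.length_nil, List.drop_succ_cons, List.drop_zero]
      by_cases hx : c = x
      · subst hx
        simp only [BEq.rfl, if_pos]
        rw [ih m [] (cur.reverse :: acc) (by simpa using Nat.le_of_succ_le_succ hf)]
        simp [mySplit]
        cases mySplit c xs <;> simp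
      · have hbe : (c == x) = false := by simp [hx]
        simp only [hbe, Bool.false_eq_true, if_neg, not_false_iff]
        rw [ih m (x :: cur) acc (by simpa using Nat.le_of_succ_le_succ hf)]
        have hsp : mySplit c (x :: xs) = (mySplit c xs).modifyHead (x :: ·) := by
          simp only [mySplit, if_neg (show ¬ x = c from fun h => hx h.symm)]
        rw [hsp]
        cases h : mySplit c xs with
        | nil => exact absurd h (mySplit_ne_nil c xs)
        | cons a t => simp

theorem chars_splitOn_singleton (c : Char) (l : List Char) :
    PySem.Chars.splitOn l [c] = mySplit c l := by
  have := splitOn_go_singleton c l (l.length + 1) [] [] (by omega)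
  simp only [PySem.Chars.splitOn] at *
  rw [this]
  cases h : mySplit c l with
  | nil => exact absurd h (mySplit_ne_nil c l)
  | cons a t => simp

theorem join_nil_eq_flatten (parts : List (List Char)) :
    PySem.Chars.join [] parts = parts.flatten := by
  induction parts with
  | nil => simp [PySem.Chars.join, List.intercalate]
  | cons a t ih =>
    cases t with
    | nil => simp [PySem.Chars.join, List.intercalate]
    | cons b t' =>
      simp only [PySem.Chars.join, List.intercalate] at *
      simp [List.intersperse] at *
      simpa using ih

theorem foldl_app2 (l : List (List Char × Char)) :
    ∀ acc : List (List Char),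
      l.foldl (fun acc p => acc ++ [[p.2], p.1]) acc
        = acc ++ l.flatMap (fun p => [[p.2], p.1]) := by
  induction l with
  | nil => intro acc; simp
  | cons p t ih => intro acc; simp [List.foldl_cons, ih]

-- A's fold, from counter k with the full vowel list vsAll, computes `scan body (vsAll.drop k)`.
theorem foldA_eq_scan (vsAll : List Char) :
    ∀ (body : List Char) (k : Nat) (acc : List Char),
      body.count '*' + k ≤ vsAll.length →
      body.foldl
        (fun (st : List Char × Int) i =>
          if i = '*' then
            (st.1 ++ [(PySem.List.pyGet? vsAll st.2).getD ' '], st.2 + 1)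
          else
            (st.1 ++ [i], st.2))
        (acc, (k : Int))
      = (acc ++ scan body (vsAll.drop k), ((k + body.count '*' : Nat) : Int)) := by
  intro body
  induction body with
  | nil => intro k acc _; simp [scan]
  | cons x xs ih =>
    intro k acc h
    by_cases hx : x = '*'
    · subst hx
      have hk : k < vsAll.length := by
        simp [List.count_cons] at h
        omega
      simp only [List.foldl_cons, eq_self_iff_true, if_true]
      have hget : (PySem.List.pyGet? vsAll ((k : Nat) : Int)).getD ' '
          = (vsAll.drop k).headD ' ' := by
        rw [PySem.List.pyGet?_natCast, ← List.head?_drop]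
        cases h' : (vsAll.drop k).head? with
        | none =>
          exfalso
          have hnil : vsAll.drop k = [] := List.head?_eq_none_iff.mp h'
          have := List.drop_eq_nil_iff.mp hnil
          omega
        | some a =>
          obtain ⟨t, ht⟩ : ∃ t, vsAll.drop k = a :: t := by
            cases hd : vsAll.drop k with
            | nil => rw [hd] at h'; simp at h'
            | cons b t => rw [hd] at h'; simp at h'; exact ⟨t, by rw [h']⟩
          simp [ht, List.headD]
      have hcast : ((k : Nat) : Int) + 1 = (((k + 1 : Nat)) : Int) := by push_cast; ring
      rw [hget, hcast, ih (k + 1) (acc ++ [(vsAll.drop k).headD ' ']) (by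
        simp [List.count_cons] at h ⊢; omega)]
      have htl : vsAll.drop (k + 1) = (vsAll.drop k).tail := by
        simp [List.tail_drop]
      rw [htl]
      simp [scan, List.count_cons]
      push_cast
      ring
    · simp only [List.foldl_cons, if_neg hx]
      rw [ih k (acc ++ [x]) (by simp [List.count_cons, hx] at h ⊢; omega)]
      simp [scan, hx, List.count_cons]

-- B's interleaving of the split segments with the vowels is `scan`.
theorem scan_eq_split :
    ∀ (body vs : List Char), body.count '*' ≤ vs.length →
      scan body vs
        = (mySplit '*' body).headD []
            ++ ((List.zip (mySplit '*' body).tail vs).flatMap (fun p => [[p.2], p.1])).flatten := by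
  intro body
  induction body with
  | nil => intro vs _; simp [scan, mySplit]
  | cons x xs ih =>
    intro vs h
    by_cases hx : x = '*'
    · subst hx
      have hvs : 1 ≤ vs.length := by simp [List.count_cons] at h; omega
      cases vs with
      | nil => simp at hvs
      | cons v vs' =>
        cases hsp : mySplit '*' xs with
        | nil => exact absurd hsp (mySplit_ne_nil '*' xs)
        | cons h0 t0 =>
          have hxs : xs.count '*' ≤ vs'.length := by
            simp [List.count_cons] at h; omega
          have hih := ih (vs := vs') hxs
          rw [hsp] at hih
          have hm : mySplit '*' ('*' :: xs) = [] :: h0 :: t0 := by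
            simp [mySplit, hsp]
          rw [hm]
          simp only [List.headD_cons, List.tail_cons] at hih
          simp only [scan, if_pos rfl, List.headD_cons, List.tail_cons, List.zip_cons_cons,
            List.flatMap_cons, List.flatten_append, List.nil_append]
          simp [hih]
    · cases hsp : mySplit '*' xs with
      | nil => exact absurd hsp (mySplit_ne_nil '*' xs)
      | cons h0 t0 =>
        have hxs : xs.count '*' ≤ vs.length := by
          simp [List.count_cons, hx] at h ⊢; omega
        have hih := ih (vs := vs) hxs
        rw [hsp] at hih
        have hm : mySplit '*' (x :: xs) = (x :: h0) :: t0 := by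
          simp [mySplit, hx, hsp]
        rw [hm]
        simp only [List.headD_cons, List.tail_cons] at hih
        simp only [scan, if_neg hx, List.headD_cons, List.tail_cons]
        simp [hih]

-- ===== VERDICT (by name: the statement is the Claim_ definition above) =====
theorem razveljavi_disemvowel_spec : Claim_equal_razveljavi_disemvowel := by
  intro niz _
  unfold Spec_razveljavi_disemvowel razveljavi_disemvowel razveljavi_disemvowel_alt
  simp only [PySem.Str.count, show ("*" : String).toList = ['*'] from rfl]
  set l := niz.toList with hl
  by_cases h0 : PySem.Chars.count l ['*'] = 0
  · simp [h0]
  · simp only [h0, if_neg, not_false_iff]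
    set n := PySem.Chars.count l ['*'] with hn
    have hcnt : n = l.count '*' := by rw [hn, chars_count_singleton]
    have hpos : 0 < n := Nat.pos_of_ne_zero h0
    have hle : n ≤ l.length := by rw [hcnt]; exact List.count_le_length
    have hslice1 : PySem.Chars.slice l (some (-(n : Int))) none = l.drop (l.length - n) := by
      simp only [PySem.Chars.slice_eq_listSlice]
      exact PySem.List.slice_from_neg_natCast l n hpos
    have hslice2 : PySem.Chars.slice l none (some (-(n : Int))) = l.take (l.length - n) := by
      simp only [PySem.Chars.slice_eq_listSlice]
      exact PySem.List.slice_to_neg_natCast l n hpos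
    rw [hslice1, hslice2]
    set body := l.take (l.length - n) with hbody
    set vs := l.drop (l.length - n) with hvs
    have hvslen : vs.length = n := by
      rw [hvs, List.length_drop]; omega
    have hbcnt : body.count '*' ≤ vs.length := by
      rw [hvslen, hcnt]
      rw [hbody]
      conv_rhs => rw [← List.take_append_drop (l.length - n) l]
      rw [List.count_append]
      omega
    -- A side
    have hA := foldA_eq_scan vs body 0 [] (by simpa using hbcnt)
    simp only [Nat.cast_zero, List.drop_zero] at hA
    rw [hA]
    -- B side
    rw [chars_splitOn_singleton, foldl_app2, join_nil_eq_flatten]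
    have hB := scan_eq_split body vs hbcnt
    cases hsp : mySplit '*' body with
    | nil => exact absurd hsp (mySplit_ne_nil '*' body)
    | cons s0 t0 =>
      rw [hsp] at hB
      simp only [List.headD, List.tail, List.nil_append] at hB ⊢
      simp [hB]
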